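-- pv_equiv track=rewrite | github.com/yujianankwc/lego-part-adapter-tool | designer-plan-miniapp/backend/part_adapter_store.py | _infer_exact_part_from_history
-- ===== SOURCE A (Python) =====
-- from typing import Any, Dict, List, Optional
--
-- def _infer_exact_part_from_history(
--
--     history_candidates: List[Dict[str, Any]],
-- ) -> str:
--     part_nos = {
--         str(item.get('gobricks_part_no') or '').strip()
--         for item in history_candidates
--         if isinstance(item, dict) and str(item.get('gobricks_part_no') or '').strip()
--     }
--     if len(part_nos) == 1:
--         return next(iter(part_nos))
--     return ''
-- ===== SOURCE B (Python) =====
-- from typing import Any, Dict, List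
--
-- def _infer_exact_part_from_history(
--     history_candidates: List[Dict[str, Any]],
-- ) -> str:
--     seen = None
--     for item in history_candidates:
--         if not isinstance(item, dict):
--             continue
--         value = str(item.get('gobricks_part_no') or '').strip()
--         if not value:
--             continue
--         if seen is None:
--             seen = value
--         elif value != seen:
--             return ''
--     return seen if seen is not None else ''
-- ===== Notes on version B (the rewrite author's own statement) =====
-- stated objective: simpler
-- what changed: Replaces the set comprehension plus size check by a single pass keeping one scalar 'seen' with an early exit on the first conflicting part number.
import Mathlib
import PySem

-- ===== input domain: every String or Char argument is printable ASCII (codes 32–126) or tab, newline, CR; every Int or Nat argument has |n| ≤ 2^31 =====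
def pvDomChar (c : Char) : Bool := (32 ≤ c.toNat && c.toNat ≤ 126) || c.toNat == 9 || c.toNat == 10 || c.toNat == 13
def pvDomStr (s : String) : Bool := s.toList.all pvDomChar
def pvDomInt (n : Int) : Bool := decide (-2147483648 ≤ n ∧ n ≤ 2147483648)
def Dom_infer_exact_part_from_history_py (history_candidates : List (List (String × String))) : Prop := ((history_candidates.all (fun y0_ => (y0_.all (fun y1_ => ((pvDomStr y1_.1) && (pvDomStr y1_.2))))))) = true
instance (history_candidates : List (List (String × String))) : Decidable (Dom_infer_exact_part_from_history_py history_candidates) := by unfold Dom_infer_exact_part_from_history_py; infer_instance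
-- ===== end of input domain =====

-- B replaces A's "collect a set of distinct stripped part numbers, then test its size"
-- by a single pass holding one scalar `seen` with an early return on the first conflict (objective: simpler).

-- ===== PORT A =====
-- str(item.get('gobricks_part_no') or '').strip() : values are strings, so `or ''` maps a
-- missing key / empty string to '' and str(...) is the identity.
def pvPartNo (item : List (String × String)) : String :=
  PySem.Str.strip (PySem.Dict.getD (PySem.Dict.mk item) "gobricks_part_no" "")

def infer_exact_part_from_history_py (history_candidates : List (List (String × String))) : String :=
  -- the set comprehension: iterate, keep the stripped value when non-empty (every item is a dict here)
  let part_nos : PySem.Set String :=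
    history_candidates.foldl
      (fun s item =>
        let v := pvPartNo item
        if v ≠ "" then PySem.Set.add s v else s)
      PySem.Set.empty
  if PySem.Set.len part_nos = 1 then part_nos.headD "" else ""

-- ===== PORT B =====
def pvAltGo (seen : Option String) : List (List (String × String)) → String
  | [] => seen.getD ""
  | item :: rest =>
    let v := pvPartNo item
    if v = "" then pvAltGo seen rest
    else
      match seen with
      | none => pvAltGo (some v) rest
      | some s => if v ≠ s then "" else pvAltGo seen rest

def infer_exact_part_from_history_py_alt (history_candidates : List (List (String × String))) : String :=
  pvAltGo none history_candidates

-- ===== PRECONDITION & SPEC =====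
def Spec_infer_exact_part_from_history_py (history_candidates : List (List (String × String))) (out : String) : Prop := out = infer_exact_part_from_history_py_alt history_candidates
instance (history_candidates : List (List (String × String))) (out : String) : Decidable (Spec_infer_exact_part_from_history_py history_candidates out) := by unfold Spec_infer_exact_part_from_history_py; infer_instance

-- ===== CLAIM (what is proved, stated in full; the proofs are below) =====
def Claim_equal_infer_exact_part_from_history_py : Prop := ∀ (history_candidates : List (List (String × String))), Dom_infer_exact_part_from_history_py history_candidates → Spec_infer_exact_part_from_history_py history_candidates (infer_exact_part_from_history_py history_candidates)

-- ===== LEMMAS AND PROOFS =====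

def pvStep (s : PySem.Set String) (item : List (String × String)) : PySem.Set String :=
  let v := pvPartNo item
  if v ≠ "" then PySem.Set.add s v else s

-- the fold only ever appends: the initial set is a prefix of the result
theorem pvFold_prefix (hs : List (List (String × String))) (S : PySem.Set String) :
    S <+: hs.foldl pvStep S := by
  induction hs generalizing S with
  | nil => exact List.prefix_refl S
  | cons item rest ih =>
    refine List.IsPrefix.trans ?_ (ih (pvStep S item))
    simp only [pvStep, PySem.Set.add]
    split_ifs <;> simp

def pvFinish (S : PySem.Set String) : String :=
  if PySem.Set.len S = 1 then S.headD "" else ""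

theorem pvFinish_big (hs : List (List (String × String))) (S : PySem.Set String)
    (h : 2 ≤ S.length) : pvFinish (hs.foldl pvStep S) = "" := by
  have hlen := (pvFold_prefix hs S).length_le
  unfold pvFinish PySem.Set.len
  rw [if_neg]; omega

theorem pvAltGo_some (hs : List (List (String × String))) (s : String) :
    pvAltGo (some s) hs = pvFinish (hs.foldl pvStep [s]) := by
  induction hs generalizing s with
  | nil => simp [pvAltGo, pvFinish, PySem.Set.len]
  | cons item rest ih =>
    simp only [pvAltGo, List.foldl]
    by_cases hv : pvPartNo item = ""
    · rw [if_pos hv]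
      have : pvStep [s] item = [s] := by simp [pvStep, hv]
      rw [this]; exact ih s
    · rw [if_neg hv]
      by_cases hvs : pvPartNo item = s
      · have : pvStep [s] item = [s] := by
          simp [pvStep, PySem.Set.add, PySem.Set.contains, hvs]
        rw [this]
        simp only [hvs, ne_eq, not_true_eq_false, if_false]
        exact ih s
      · have hst : pvStep [s] item = [s, pvPartNo item] := by
          simp [pvStep, hv, PySem.Set.add, PySem.Set.contains]
          intro h; exact absurd h hvs
        rw [hst]
        simp only [ne_eq, hvs, not_false_eq_true, if_true]
        exact (pvFinish_big rest [s, pvPartNo item] (by simp)).symm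

theorem pvAltGo_none (hs : List (List (String × String))) :
    pvAltGo none hs = pvFinish (hs.foldl pvStep []) := by
  induction hs with
  | nil => simp [pvAltGo, pvFinish, PySem.Set.len, Option.getD]
  | cons item rest ih =>
    simp only [pvAltGo, List.foldl]
    by_cases hv : pvPartNo item = ""
    · rw [if_pos hv]
      have : pvStep [] item = [] := by simp [pvStep, hv]
      rw [this]; exact ih
    · rw [if_neg hv]
      have : pvStep [] item = [pvPartNo item] := by
        simp [pvStep, hv, PySem.Set.add, PySem.Set.contains]
      rw [this]
      exact pvAltGo_some rest (pvPartNo item)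

-- ===== VERDICT (by name: the statement is the Claim_ definition above) =====
theorem infer_exact_part_from_history_py_spec : Claim_equal_infer_exact_part_from_history_py := by
  intro hs _
  show infer_exact_part_from_history_py hs = infer_exact_part_from_history_py_alt hs
  rw [infer_exact_part_from_history_py_alt, pvAltGo_none]
  rfl
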